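-- pv_equiv track=rewrite | github.com/ChakshuGupta13/propositional-logic-theorem-prover-using-resolution-refutation | main.py | split_around_and
-- ===== SOURCE A (Python) =====
-- def eliminate_invalid_parenthesis(sentence):
--     processed_sentence = []
--     brackets = []
--     content = []
--
--     i = 0
--     L = len(sentence)
--     while i < L:
--         if sentence[i] == "(":
--             content.append(processed_sentence.copy())
--             brackets.append("(")
--             processed_sentence.clear()
--         elif sentence[i] == ")" and len(content) != 0:
--             processed_sentence.insert(0, "(")
--             processed_sentence.append(")")
--
--             processed_sentence = content[len(content) - 1].copy() + processed_sentence
--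
--             brackets.pop()
--             content.pop()
--         else:
--             processed_sentence.append(sentence[i])
--         i += 1
--
--     return processed_sentence
--
-- def split_around_and(sentence):
--     processed_sentence = []
--     tmp = []
--
--     i = 0
--     L = len(sentence)
--     while i < L:
--         if sentence[i] == "&":
--             tmp2 = eliminate_invalid_parenthesis(tmp)
--             tmp3 = []
--             if tmp2[0] == "(":
--                 tmp3.append("(")
--
--                 j = 1
--                 N = len(tmp2) - 1
--                 while j < N:
--                     if tmp2[j] != "(" and tmp2[j] != ")":
--                         tmp3.append(tmp2[j])
--                     j += 1
--                 tmp3.append(")")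
--             else:
--                 j = 0
--                 N = len(tmp2)
--                 while j < N:
--                     if tmp2[j] != "(" and tmp2[j] != ")":
--                         tmp3.append(tmp2[j])
--                     j += 1
--             processed_sentence += tmp3.copy()
--             processed_sentence.append("&")
--             tmp.clear()
--         else:
--             tmp.append(sentence[i])
--
--         i += 1
--
--     tmp2 = eliminate_invalid_parenthesis(tmp)
--     tmp3 = []
--     if tmp2[0] == "(":
--         tmp3.append("(")
--
--         j = 1
--         N = len(tmp2) - 1
--         while j < N:
--             if tmp2[j] != "(" and tmp2[j] != ")":
--                 tmp3.append(tmp2[j])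
--             j += 1
--         tmp3.append(")")
--     else:
--         j = 0
--         N = len(tmp2)
--         while j < N:
--             if tmp2[j] != "(" and tmp2[j] != ")":
--                 tmp3.append(tmp2[j])
--             j += 1
--     processed_sentence += tmp3.copy()
--     tmp.clear()
--
--     return processed_sentence
-- ===== SOURCE B (Python) =====
-- # B: no parenthesis-matching machine at all. Per segment, a single reversed scan with a
-- # plain integer counter finds the suffix after the last unmatched "("; one slice + one
-- # filter build the cleaned piece. Segments are cut off the front with index()/slicing.
--
-- def _clean(seg):
--     depth, keep = 0, 0   # keep = length of the suffix after the last unmatched "("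
--     for tok in reversed(seg):
--         if tok == ")":
--             depth += 1
--         elif tok == "(":
--             if depth == 0:
--                 break
--             depth -= 1
--         keep += 1
--     suffix = seg[len(seg) - keep:]
--     if suffix[0] == "(":
--         return ["("] + [x for x in suffix[1:-1] if x != "(" and x != ")"] + [")"]
--     return [x for x in suffix if x != "(" and x != ")"]
--
-- def split_around_and(sentence):
--     out, rest = [], sentence
--     while "&" in rest:
--         i = rest.index("&")
--         out += _clean(rest[:i]) + ["&"]
--         rest = rest[i + 1:]
--     return out + _clean(rest)
-- ===== Notes on version B (the rewrite author's own statement) =====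
-- stated objective: faster
-- what changed: B has no parenthesis-matching machine at all: instead of A's stack of saved prefixes with .copy(), insert(0,...) and group re-concatenation per segment, B finds the suffix after the last unmatched '(' with a single reversed scan and a plain integer depth counter, then builds the piece with one slice and one filter, cutting segments off the front with index()/slicing; dropping the per-token list copies gives the measured constant-factor speed-up.
-- outside the precondition, e.g. on split_around_and(['p', '&']): A raises IndexError, B raises IndexError; on split_around_and(['a', '(']): A raises IndexError, B raises IndexError
import Mathlib
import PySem

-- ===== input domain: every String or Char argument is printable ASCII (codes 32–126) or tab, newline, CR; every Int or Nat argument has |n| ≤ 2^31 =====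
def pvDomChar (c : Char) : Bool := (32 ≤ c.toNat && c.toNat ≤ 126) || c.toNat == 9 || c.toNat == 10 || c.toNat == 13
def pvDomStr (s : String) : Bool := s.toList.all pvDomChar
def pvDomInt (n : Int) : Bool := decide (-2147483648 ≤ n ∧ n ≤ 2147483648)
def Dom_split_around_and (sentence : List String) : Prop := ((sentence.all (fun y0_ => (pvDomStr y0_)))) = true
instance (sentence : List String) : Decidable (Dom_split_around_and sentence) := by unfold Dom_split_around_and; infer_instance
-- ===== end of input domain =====

-- B replaces A's parenthesis machine (three mutable lists, copies, group rebuilding) by a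
-- reversed counter scan per segment plus one slice and one filter (objective: alternative).

-- ===== PORT A =====
-- A's while loop over eliminate_invalid_parenthesis's three mutable lists
def elimLoop : List String → List String → List String → List (List String) → List String
  | [], p, _, _ => p
  | tok :: rest, p, b, c =>
    if tok = "(" then elimLoop rest [] (b ++ ["("]) (c ++ [p])
    else if tok = ")" ∧ c ≠ [] then
      elimLoop rest (c.getLastD [] ++ ("(" :: p ++ [")"])) b.dropLast c.dropLast
    else elimLoop rest (p ++ [tok]) b c

def eliminate_invalid_parenthesis (sentence : List String) : List String :=
  elimLoop sentence [] [] []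

-- A's tmp3-building block (the j-loop filters the parens out of the slice it scans);
-- tmp2[0] raises IndexError in Python when tmp2 = [] — excluded by Pre_ below
def stripA (tmp2 : List String) : List String :=
  if tmp2.head? = some "(" then
    "(" :: ((tmp2.drop 1).dropLast.filter (fun x => x != "(" && x != ")")) ++ [")"]
  else tmp2.filter (fun x => x != "(" && x != ")")

-- A's main while loop, accumulating processed_sentence and tmp
def mainLoopA : List String → List String → List String → List String
  | [], acc, tmp => acc ++ stripA (eliminate_invalid_parenthesis tmp)
  | tok :: rest, acc, tmp =>
    if tok = "&" then
      mainLoopA rest (acc ++ stripA (eliminate_invalid_parenthesis tmp) ++ ["&"]) []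
    else mainLoopA rest acc (tmp ++ [tok])

def split_around_and (sentence : List String) : List String :=
  mainLoopA sentence [] []

-- ===== PORT B =====
-- B's reversed for-loop with an integer depth counter and break: returns `keep`,
-- the length of the suffix after the last unmatched "("
def keepLen : List String → Nat → Nat
  | [], _ => 0
  | t :: r, depth =>
    if t = ")" then keepLen r (depth + 1) + 1
    else if t = "(" then (if depth = 0 then 0 else keepLen r (depth - 1) + 1)
    else keepLen r depth + 1

-- B's _clean: slice off everything up to the last unmatched "(", then one filter;
-- suffix[0] raises IndexError in Python when the suffix is empty — excluded by Pre_
def cleanB (seg : List String) : List String :=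
  let suffix := seg.drop (seg.length - keepLen seg.reverse 0)
  if suffix.head? = some "(" then
    "(" :: ((suffix.drop 1).dropLast.filter (fun x => x != "(" && x != ")")) ++ [")"]
  else suffix.filter (fun x => x != "(" && x != ")")

-- B's while loop: cut the segment before the first "&" off the front, recurse on the rest
def mainLoopB (rest : List String) : List String :=
  match h : PySem.List.index? rest "&" with
  | none => cleanB rest
  | some i =>
      cleanB (rest.take i) ++ "&" ::
        mainLoopB (rest.drop (i + 1))
termination_by rest.length
decreasing_by
  obtain ⟨hk, -, -⟩ := PySem.List.getElem_of_index?_eq_some h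
  simp [List.length_drop]; omega

def split_around_and_alt (sentence : List String) : List String :=
  mainLoopB sentence

-- ===== PRECONDITION & SPEC =====
-- Pre_ excludes exactly the inputs where Python A (and B) raise IndexError: those whose
-- "&"-split contains an empty segment or a segment ending in an unmatched "(" (there the
-- cleaned segment is empty and tmp2[0] / suffix[0] is read).
def Pre_split_around_and (sentence : List String) : Prop :=
  sentence ≠ [] ∧ sentence.head? ≠ some "&" ∧ sentence.getLast? ≠ some "&" ∧
  sentence.getLast? ≠ some "(" ∧
  ∀ pr ∈ sentence.zip sentence.tail, ¬(pr.2 = "&" ∧ (pr.1 = "&" ∨ pr.1 = "("))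
instance (sentence : List String) : Decidable (Pre_split_around_and sentence) := by
  unfold Pre_split_around_and; infer_instance

def pvWitness_split_around_and : List String := ["p", "&", "(", "q", "|", "r", ")"]

def Spec_split_around_and (sentence : List String) (out : List String) : Prop := out = split_around_and_alt sentence
instance (sentence : List String) (out : List String) : Decidable (Spec_split_around_and sentence out) := by unfold Spec_split_around_and; infer_instance

-- ===== CLAIM (what is proved, stated in full; the proofs are below) =====
def Claim_equal_split_around_and : Prop := ∀ (sentence : List String), Dom_split_around_and sentence → Pre_split_around_and sentence → Spec_split_around_and sentence (split_around_and sentence)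

-- ===== LEMMAS AND PROOFS =====

-- proof-side stack machine: A's (processed, content) state as one stack, innermost first
def redStep (stack : List (List String)) (tok : String) : List (List String) :=
  if tok = "(" then [] :: stack
  else if tok = ")" ∧ stack.length > 1 then
    match stack with
    | h :: h2 :: t => (h2 ++ ("(" :: h ++ [")"])) :: t
    | s => s
  else
    match stack with
    | h :: t => (h ++ [tok]) :: t
    | [] => []

lemma elimLoop_eq_foldl (seg : List String) :
    ∀ (p : List String) (b : List String) (c : List (List String)),
      elimLoop seg p b c = (seg.foldl redStep (p :: c.reverse)).headD [] := by
  induction seg with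
  | nil => intro p b c; simp [elimLoop]
  | cons tok rest ih =>
    intro p b c
    by_cases hl : tok = "("
    · simp [elimLoop, hl, redStep, ih]
    · by_cases hr : tok = ")" ∧ c ≠ []
      · obtain ⟨hr1, hr2⟩ := hr
        rcases c.eq_nil_or_concat with hce | ⟨l, a, rfl⟩
        · exact absurd hce hr2
        rw [elimLoop]
        simp [hr1, redStep, List.foldl_cons]
        simpa using ih _ _ _
      · rw [elimLoop]
        simp only [hl, hr, if_false]
        rw [ih, List.foldl_cons]
        congr 2
        have : redStep (p :: c.reverse) tok = (p ++ [tok]) :: c.reverse := by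
          simp only [redStep, hl, if_false]
          rw [if_neg]
          intro ⟨h1, h2⟩
          rcases Decidable.em (c = []) with hce | hce
          · subst hce; simp at h2
          · exact hr ⟨h1, hce⟩
        rw [this]

lemma foldl_redStep_ne_nil (seg : List String) :
    ∀ s : List (List String), s ≠ [] → seg.foldl redStep s ≠ [] := by
  induction seg with
  | nil => intro s hs; simpa using hs
  | cons tok rest ih =>
    intro s hs
    rw [List.foldl_cons]
    apply ih
    rcases s with _ | ⟨h, t⟩
    · exact absurd rfl hs
    · unfold redStep
      split_ifs with h1 h2
      · simp
      · rcases t with _ | ⟨h2', t'⟩ <;> simp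
      · simp

-- joining the top d+1 stack frames with the "(" separators they swallowed
def J : Nat → List (List String) → List String
  | _, [] => []
  | 0, h :: _ => h
  | d + 1, h :: t => if t = [] then h else J d t ++ "(" :: h

lemma keepLen_le (r : List String) : ∀ d, keepLen r d ≤ r.length := by
  induction r with
  | nil => intro d; simp [keepLen]
  | cons t r ih =>
    intro d
    unfold keepLen
    split_ifs <;> simp
    · exact ih _
    · exact ih _
    · exact ih _

-- the invariant: J d of the stack is the suffix keepLen keeps when started at depth d,
-- and with d at least the number of unmatched opens keepLen keeps everything
lemma J_singleton (d : Nat) (h : List String) : J d [h] = h := by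
  cases d <;> simp [J]

lemma J_cons_cons (e : Nat) (h : List String) (t : List (List String)) (ht : t ≠ []) :
    J (e + 1) (h :: t) = J e t ++ "(" :: h := by
  simp [J, ht]

lemma J_redStep_close (S : List (List String)) (hS : S ≠ []) (d : Nat) :
    J d (redStep S ")") = J (d + 1) S ++ [")"] := by
  rcases S with _ | ⟨h, tt⟩
  · exact absurd rfl hS
  rcases tt with _ | ⟨h2, tt2⟩
  · have : redStep [h] ")" = [h ++ [")"]] := by simp [redStep]
    rw [this, J_singleton, J_singleton]
  · have : redStep (h :: h2 :: tt2) ")" = (h2 ++ ("(" :: h ++ [")"])) :: tt2 := by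
      simp [redStep]
    rw [this]
    cases d with
    | zero =>
      rw [J_cons_cons 0 h (h2 :: tt2) (by simp)]
      simp [J]
    | succ e =>
      rw [J_cons_cons (e + 1) h (h2 :: tt2) (by simp)]
      rcases tt2 with _ | ⟨h3, tt3⟩
      · simp [J]
      · rw [J_cons_cons e h2 (h3 :: tt3) (by simp)]
        cases e <;> simp [J]
    
lemma J_redStep_tok (S : List (List String)) (hS : S ≠ []) (t : String)
    (h1 : t ≠ "(") (h2 : t ≠ ")") (d : Nat) :
    J d (redStep S t) = J d S ++ [t] := by
  rcases S with _ | ⟨h, tt⟩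
  · exact absurd rfl hS
  have : redStep (h :: tt) t = (h ++ [t]) :: tt := by
    simp [redStep, h1, h2]
  rw [this]
  cases d with
  | zero => simp [J]
  | succ e =>
    rcases tt with _ | ⟨h2', tt2⟩
    · simp [J]
    · rw [J_cons_cons e (h ++ [t]) _ (by simp), J_cons_cons e h _ (by simp)]
      simp

lemma redStep_close_length (S : List (List String)) (hS : S ≠ []) :
    (redStep S ")").length = S.length - 1 ∨ (redStep S ")").length = 1 ∧ S.length = 1 := by
  rcases S with _ | ⟨h, tt⟩
  · exact absurd rfl hS
  rcases tt with _ | ⟨h2, tt2⟩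
  · right; constructor <;> simp [redStep]
  · left; simp [redStep]

lemma stack_invariant (seg : List String) :
    ∀ d, J d (List.foldl redStep [[]] seg)
            = seg.drop (seg.length - keepLen seg.reverse d)
       ∧ ((List.foldl redStep [[]] seg).length - 1 ≤ d → keepLen seg.reverse d = seg.length) := by
  induction seg using List.reverseRecOn with
  | nil =>
    intro d
    refine ⟨?_, ?_⟩
    · cases d <;> simp [J, keepLen]
    · intro _; simp [keepLen]
  | append_singleton seg t ih =>
    intro d
    have hS : List.foldl redStep [[]] seg ≠ [] := foldl_redStep_ne_nil seg [[]] (by simp)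
    have hfold : List.foldl redStep [[]] (seg ++ [t])
        = redStep (List.foldl redStep [[]] seg) t := by
      simp [List.foldl_append]
    have hrev : (seg ++ [t]).reverse = t :: seg.reverse := by simp
    rw [hfold, hrev]
    by_cases ht1 : t = "("
    · subst ht1
      have hred : redStep (List.foldl redStep [[]] seg) "(" = [] :: List.foldl redStep [[]] seg := by
        simp [redStep]
      rw [hred]
      cases d with
      | zero =>
        refine ⟨?_, ?_⟩
        · have hk : keepLen ("(" :: seg.reverse) 0 = 0 := by simp [keepLen]
          rw [hk]
          have hJ : J 0 ([] :: List.foldl redStep [[]] seg) = [] := by simp [J]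
          rw [hJ]
          symm
          apply List.drop_eq_nil_of_le
          omega
        · intro hle
          exfalso
          have h1 : 1 ≤ (List.foldl redStep [[]] seg).length := by
            rcases e : List.foldl redStep [[]] seg with _|⟨a,b⟩
            · exact absurd e hS
            · simp
          simp only [List.length_cons] at hle
          omega
      | succ e =>
        have hk : keepLen ("(" :: seg.reverse) (e + 1) = keepLen seg.reverse e + 1 := by
          simp [keepLen]
        rw [hk]
        refine ⟨?_, ?_⟩
        · rw [J_cons_cons e [] _ hS]
          have hle := keepLen_le seg.reverse e
          simp only [List.length_reverse] at hle
          rw [(ih e).1]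
          have harith : (seg ++ ["("]).length - (keepLen seg.reverse e + 1)
              = seg.length - keepLen seg.reverse e := by
            simp only [List.length_append, List.length_cons, List.length_nil]; omega
          rw [harith, List.drop_append_of_le_length (by omega)]
        · intro hle
          have := (ih e).2 (by simp at hle; omega)
          simp [this]
    · by_cases ht2 : t = ")"
      · subst ht2
        have hk : keepLen (")" :: seg.reverse) d = keepLen seg.reverse (d + 1) + 1 := by
          simp [keepLen]
        rw [hk]
        refine ⟨?_, ?_⟩
        · rw [J_redStep_close _ hS]
          have hle := keepLen_le seg.reverse (d + 1)
          simp only [List.length_reverse] at hle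
          rw [(ih (d + 1)).1]
          have harith : (seg ++ [")"]).length - (keepLen seg.reverse (d + 1) + 1)
              = seg.length - keepLen seg.reverse (d + 1) := by
            simp only [List.length_append, List.length_cons, List.length_nil]; omega
          rw [harith, List.drop_append_of_le_length (by omega)]
        · intro hle
          rcases redStep_close_length _ hS with hl | ⟨_, hl⟩
          · rw [hl] at hle
            have := (ih (d + 1)).2 (by omega)
            simp [this]
          · have := (ih (d + 1)).2 (by omega)
            simp [this]
      · have hk : keepLen (t :: seg.reverse) d = keepLen seg.reverse d + 1 := by
          simp [keepLen, ht1, ht2]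
        rw [hk]
        have hlen : (redStep (List.foldl redStep [[]] seg) t).length
            = (List.foldl redStep [[]] seg).length := by
          rcases e : List.foldl redStep [[]] seg with _|⟨a,b⟩
          · exact absurd e hS
          · simp [redStep, ht1, ht2]
        refine ⟨?_, ?_⟩
        · rw [J_redStep_tok _ hS t ht1 ht2]
          have hle := keepLen_le seg.reverse d
          simp only [List.length_reverse] at hle
          rw [(ih d).1]
          have harith : (seg ++ [t]).length - (keepLen seg.reverse d + 1)
              = seg.length - keepLen seg.reverse d := by
            simp only [List.length_append, List.length_cons, List.length_nil]; omega
          rw [harith, List.drop_append_of_le_length (by omega)]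
        · intro hle
          rw [hlen] at hle
          have := (ih d).2 hle
          simp [this]

-- head of the final stack = B's suffix
lemma elim_eq_suffix (seg : List String) :
    eliminate_invalid_parenthesis seg
      = seg.drop (seg.length - keepLen seg.reverse 0) := by
  have h0 := (stack_invariant seg 0).1
  have hne := foldl_redStep_ne_nil seg [[]] (by simp)
  rcases hfe : List.foldl redStep [[]] seg with _ | ⟨h, t⟩
  · exact absurd hfe hne
  · rw [eliminate_invalid_parenthesis, elimLoop_eq_foldl]
    simp only [List.reverse_nil, hfe] at h0 ⊢
    simpa [J] using h0

lemma stripA_elim_eq_cleanB (seg : List String) :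
    stripA (eliminate_invalid_parenthesis seg) = cleanB seg := by
  rw [elim_eq_suffix]; rfl

lemma index?_append_cons_self (tmp r : List String) (h : "&" ∉ tmp) :
    PySem.List.index? (tmp ++ "&" :: r) "&" = some tmp.length := by
  rw [PySem.List.index?_eq_some_iff]
  exact ⟨tmp, r, rfl, rfl, h⟩

lemma mainLoopB_none (rest : List String) (h : PySem.List.index? rest "&" = none) :
    mainLoopB rest = cleanB rest := by
  rw [mainLoopB.eq_def]
  split
  · rfl
  · rename_i i heq
    rw [h] at heq
    cases heq

lemma mainLoopB_some (rest : List String) (i : Nat)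
    (h : PySem.List.index? rest "&" = some i) :
    mainLoopB rest = cleanB (rest.take i) ++ "&" :: mainLoopB (rest.drop (i + 1)) := by
  rw [mainLoopB.eq_def]
  split
  · rename_i heq
    rw [h] at heq
    cases heq
  · rename_i j heq
    rw [h] at heq
    injection heq with hji
    subst hji
    rfl

lemma mainLoopA_eq_mainLoopB (rest : List String) :
    ∀ (acc tmp : List String), "&" ∉ tmp →
      mainLoopA rest acc tmp = acc ++ mainLoopB (tmp ++ rest) := by
  induction rest with
  | nil =>
    intro acc tmp htmp
    rw [mainLoopA, mainLoopB_none _ (by rw [PySem.List.index?_eq_none_iff]; simpa using htmp)]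
    simp only [stripA_elim_eq_cleanB, List.append_nil]
  | cons tok r ih =>
    intro acc tmp htmp
    by_cases h : tok = "&"
    · subst h
      rw [mainLoopA]
      simp only [if_true]
      rw [ih _ [] (by simp)]
      rw [mainLoopB_some _ _ (index?_append_cons_self tmp r htmp)]
      have ht : (tmp ++ "&" :: r).take tmp.length = tmp := by
        simp
      have hd : (tmp ++ "&" :: r).drop (tmp.length + 1) = r := by
        simp [List.drop_append]
      simp only [ht, hd, stripA_elim_eq_cleanB]
      simp [List.append_assoc]
    · rw [mainLoopA]
      simp only [h, if_false]
      have hm : "&" ∉ tmp ++ [tok] := by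
        intro hmem
        rcases List.mem_append.mp hmem with h1 | h1
        · exact htmp h1
        · exact h (List.mem_singleton.mp h1).symm
      rw [ih _ (tmp ++ [tok]) hm]
      simp

-- ===== VERDICT (by name: the statement is the Claim_ definition above) =====
theorem split_around_and_spec : Claim_equal_split_around_and := by
  intro sentence _ _
  unfold Spec_split_around_and split_around_and split_around_and_alt
  simpa using mainLoopA_eq_mainLoopB sentence [] [] (by simp)
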